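-- pv_equiv track=rewrite | github.com/Jennifer6688/JennierLearning | func_py_find_smooth_numbers.py | func_py_find_smooth_numbers
-- ===== SOURCE A (Python) =====
-- def func_py_find_smooth_numbers(limit, factor):
--     def is_smooth(num):
--         while num > 1:
--             if num % factor == 0:
--                 num //= factor
--             else:
--                 return False
--         return True
--
--     return [n for n in range(2, limit) if is_smooth(n)]
-- ===== SOURCE B (Python) =====
-- def func_py_find_smooth_numbers(limit, factor):
--     # directly enumerate the powers of factor below limit
--     powers = []
--     p = factor
--     while 2 <= p < limit:
--         powers.append(p)
--         p *= factor
--     return powers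
-- ===== Notes on version B (the rewrite author's own statement) =====
-- stated objective: faster
-- what changed: Instead of testing every n in range(2, limit) by repeated division, B multiplies factor^k directly, emitting each power below limit.
-- outside the precondition, e.g. on func_py_find_smooth_numbers(5, -2): A returns [2, 4], B returns []; on func_py_find_smooth_numbers(5, -1): A returns [2, 3, 4], B returns []
-- crash fix: On factor = 0 with limit > 2, A raises ZeroDivisionError in is_smooth; B returns []. — e.g. on func_py_find_smooth_numbers(5, 0): A raises ZeroDivisionError, B returns []
import Mathlib
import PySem

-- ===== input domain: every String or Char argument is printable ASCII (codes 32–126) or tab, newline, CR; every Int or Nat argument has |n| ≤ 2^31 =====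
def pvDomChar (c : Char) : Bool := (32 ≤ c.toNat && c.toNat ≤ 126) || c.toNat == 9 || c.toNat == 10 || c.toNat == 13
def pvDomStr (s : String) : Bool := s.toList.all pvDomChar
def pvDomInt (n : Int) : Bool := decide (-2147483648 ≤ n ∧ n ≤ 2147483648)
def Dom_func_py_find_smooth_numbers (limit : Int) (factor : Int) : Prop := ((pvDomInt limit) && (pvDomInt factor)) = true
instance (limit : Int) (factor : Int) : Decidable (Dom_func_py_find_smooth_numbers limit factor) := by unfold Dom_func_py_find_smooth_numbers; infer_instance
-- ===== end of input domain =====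

-- B replaces A's trial-division scan of every n in range(2, limit) by direct multiplication
-- factor, factor^2, … below limit (asymptotically faster, measured).

-- ===== PORT A =====
-- A's inner 'while num > 1' loop, with a fuel bound (inside Pre_ the loop always
-- terminates well within num.toNat + 1 steps, so the fuel is only a totality guard).
def isSmoothA (factor : Int) : Nat → Int → Bool
  | 0, _ => false
  | fuel + 1, num =>
    if num > 1 then
      if PySem.Int.mod num factor = 0 then
        isSmoothA factor fuel (PySem.Int.floordiv num factor)
      else false
    else true

def func_py_find_smooth_numbers (limit : Int) (factor : Int) : List Int :=
  (PySem.List.pyRange 2 limit 1).filter (fun n => isSmoothA factor (n.toNat + 1) n)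

-- ===== PORT B =====
-- B's 'while 2 <= p < limit' loop; fuel limit.toNat suffices since p at least doubles.
def altLoop (limit : Int) (factor : Int) : Nat → Int → List Int
  | 0, _ => []
  | fuel + 1, p =>
    if 2 ≤ p ∧ p < limit then p :: altLoop limit factor fuel (p * factor)
    else []

def func_py_find_smooth_numbers_alt (limit : Int) (factor : Int) : List Int :=
  altLoop limit factor limit.toNat factor

-- ===== PRECONDITION & SPEC =====
-- Pre_ excludes factor ≤ 1 with limit > 2 and -factor < limit: there A raises
-- ZeroDivisionError (factor = 0), loops forever (factor = 1), or — for a negative factor —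
-- returns every multiple of |factor| below limit, an artefact of floor division on a corner
-- no caller of a powers-of-factor function would specify; B returns [] on those inputs.
def Pre_func_py_find_smooth_numbers (limit : Int) (factor : Int) : Prop :=
  2 ≤ factor ∨ limit ≤ 2 ∨ factor + limit ≤ 0
instance (limit : Int) (factor : Int) : Decidable (Pre_func_py_find_smooth_numbers limit factor) := by
  unfold Pre_func_py_find_smooth_numbers; infer_instance

def pvWitness_func_py_find_smooth_numbers : Int × Int := (50, 3)

-- A raises ZeroDivisionError whenever factor = 0 and limit > 2; B returns [] there.
def Raises_func_py_find_smooth_numbers (limit : Int) (factor : Int) : Prop :=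
  factor = 0 ∧ 2 < limit
instance (limit : Int) (factor : Int) : Decidable (Raises_func_py_find_smooth_numbers limit factor) := by
  unfold Raises_func_py_find_smooth_numbers; infer_instance

def pvRaiseWitness_func_py_find_smooth_numbers : Int × Int := (5, 0)
def pvRaiseWitnessOut_func_py_find_smooth_numbers : List Int := []

def Spec_func_py_find_smooth_numbers (limit : Int) (factor : Int) (out : List Int) : Prop :=
  out = func_py_find_smooth_numbers_alt limit factor
instance (limit : Int) (factor : Int) (out : List Int) : Decidable (Spec_func_py_find_smooth_numbers limit factor out) := by
  unfold Spec_func_py_find_smooth_numbers; infer_instance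

-- ===== CLAIM (what is proved, stated in full; the proofs are below) =====
def Claim_equal_func_py_find_smooth_numbers : Prop := ∀ (limit : Int) (factor : Int), Dom_func_py_find_smooth_numbers limit factor → Pre_func_py_find_smooth_numbers limit factor → Spec_func_py_find_smooth_numbers limit factor (func_py_find_smooth_numbers limit factor)

def Claim_raises_func_py_find_smooth_numbers : Prop := (∀ (limit : Int) (factor : Int), Dom_func_py_find_smooth_numbers limit factor → Raises_func_py_find_smooth_numbers limit factor → ¬ Pre_func_py_find_smooth_numbers limit factor) ∧ (Dom_func_py_find_smooth_numbers (pvRaiseWitness_func_py_find_smooth_numbers.1) (pvRaiseWitness_func_py_find_smooth_numbers.2) ∧ Raises_func_py_find_smooth_numbers (pvRaiseWitness_func_py_find_smooth_numbers.1) (pvRaiseWitness_func_py_find_smooth_numbers.2) ∧ func_py_find_smooth_numbers_alt (pvRaiseWitness_func_py_find_smooth_numbers.1) (pvRaiseWitness_func_py_find_smooth_numbers.2) = pvRaiseWitnessOut_func_py_find_smooth_numbers)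

-- ===== LEMMAS AND PROOFS =====

theorem altLoop_nil (limit factor : Int) (fuel : Nat) (p : Int)
    (h : ¬ (2 ≤ p ∧ p < limit)) : altLoop limit factor fuel p = [] := by
  cases fuel with
  | zero => rfl
  | succ f => simp [altLoop, h]

theorem isSmoothA_one (factor : Int) (f : Nat) : isSmoothA factor (f + 1) 1 = true := by
  simp [isSmoothA]

-- A's is_smooth decides "n is factor^k for some k ≥ 1" (for n ≥ 2, factor ≥ 2).
-- A's is_smooth decides "n is factor^k for some k ≥ 1" (for n ≥ 2, factor ≥ 2).
theorem isSmoothA_iff (factor : Int) (hf : 2 ≤ factor) :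
    ∀ (fuel : Nat) (n : Int), 2 ≤ n → n.toNat < fuel →
      (isSmoothA factor fuel n = true ↔ ∃ k : Nat, 1 ≤ k ∧ n = factor ^ k) := by
  intro fuel
  induction fuel with
  | zero => intro n hn h; omega
  | succ f ih =>
    intro n hn hfuel
    have hn1 : n > 1 := by omega
    have hfpos : (0 : Int) < factor := by omega
    by_cases hdvd : factor ∣ n
    · have hmod : PySem.Int.mod n factor = 0 := by
        rw [PySem.Int.mod_eq_emod_of_pos hfpos]
        exact Int.emod_eq_zero_of_dvd hdvd
      have hdiv : PySem.Int.floordiv n factor = n / factor :=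
        PySem.Int.floordiv_eq_ediv_of_pos hfpos
      have hge : factor ≤ n := Int.le_of_dvd (by omega) hdvd
      have hm1 : 1 ≤ n / factor := by
        rw [Int.le_ediv_iff_mul_le hfpos]; omega
      have hmn : n / factor < n := Int.ediv_lt_of_lt_mul hfpos (by nlinarith)
      have hmul : n / factor * factor = n := Int.ediv_mul_cancel hdvd
      simp only [isSmoothA, if_pos hn1, if_pos hmod, hdiv]
      by_cases hm : n / factor = 1
      · have hnf : n = factor := by rw [← hmul, hm, one_mul]
        obtain ⟨f', rfl⟩ : ∃ f', f = f' + 1 := by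
          cases f with
          | zero => omega
          | succ f' => exact ⟨f', rfl⟩
        rw [hm, isSmoothA_one]
        exact ⟨fun _ => ⟨1, le_refl 1, by rw [pow_one, hnf]⟩, fun _ => rfl⟩
      · have hm2 : 2 ≤ n / factor := by omega
        rw [ih (n / factor) hm2 (by omega)]
        constructor
        · rintro ⟨k, hk1, hk2⟩
          exact ⟨k + 1, by omega, by rw [pow_succ, ← hk2, hmul]⟩
        · rintro ⟨k, hk1, hk2⟩
          have hk2' : 2 ≤ k := by
            by_contra h
            have hk : k = 1 := by omega
            apply hm
            rw [hk2, hk, pow_one, Int.ediv_self (by omega : factor ≠ 0)]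
          refine ⟨k - 1, by omega, ?_⟩
          have hpow : n = factor ^ (k - 1) * factor := by
            rw [hk2, ← pow_succ]; congr 1; omega
          rw [hpow, Int.mul_ediv_cancel _ (by omega : factor ≠ 0)]
    · have hmod : PySem.Int.mod n factor ≠ 0 := by
        rw [PySem.Int.mod_eq_emod_of_pos hfpos]
        intro h
        exact hdvd (Int.dvd_of_emod_eq_zero h)
      simp only [isSmoothA, if_pos hn1, if_neg hmod]
      constructor
      · intro h; exact absurd h (by simp)
      · rintro ⟨k, hk1, hk2⟩
        exact absurd (hk2 ▸ dvd_pow_self factor (by omega : k ≠ 0)) hdvd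

-- Main loop correspondence: below limit, the filtered range starting at a equals the power
-- list starting at factor^(k+1), where factor^(k+1) is the least power ≥ a.
theorem mainG (limit factor : Int) (hf : 2 ≤ factor) :
    ∀ (d : Nat) (a : Int) (k : Nat) (fuel : Nat),
      (limit - a).toNat = d → 2 ≤ a → a ≤ factor ^ (k + 1) →
      (k = 0 ∨ factor ^ k < a) →
      (limit - factor ^ (k + 1)).toNat < fuel →
      (PySem.List.pyRange a limit 1).filter (fun n => isSmoothA factor (n.toNat + 1) n)
        = altLoop limit factor fuel (factor ^ (k + 1)) := by
  intro d
  induction d with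
  | zero =>
    intro a k fuel hd ha hq hlow hfuel
    have hla : limit ≤ a := by omega
    rw [PySem.List.pyRange_one_eq_nil hla]
    rw [altLoop_nil limit factor fuel _ (by rintro ⟨h1, h2⟩; omega)]
    rfl
  | succ d ih =>
    intro a k fuel hd ha hq hlow hfuel
    by_cases hal : a < limit
    · rw [PySem.List.pyRange_one_cons hal]
      have hd' : (limit - (a + 1)).toNat = d := by omega
      by_cases heq : a = factor ^ (k + 1)
      · -- a is the next power: both sides emit a
        have hsm : isSmoothA factor (a.toNat + 1) a = true := by
          rw [isSmoothA_iff factor hf (a.toNat + 1) a ha (by omega)]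
          exact ⟨k + 1, by omega, heq⟩
        have hq2 : 2 ≤ factor ^ (k + 1) := by omega
        have hgrow : factor ^ (k + 1) + 2 ≤ factor ^ (k + 1 + 1) := by
          have : factor ^ (k + 1 + 1) = factor ^ (k + 1) * factor := by rw [pow_succ]
          nlinarith
        obtain ⟨f, rfl⟩ : ∃ f, fuel = f + 1 := by
          cases fuel with
          | zero => omega
          | succ f => exact ⟨f, rfl⟩
        have hqlim : factor ^ (k + 1) < limit := by omega
        simp only [List.filter_cons, hsm, if_true]
        simp only [altLoop]
        rw [if_pos (And.intro hq2 hqlim), ← heq]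
        congr 1
        rw [show a * factor = factor ^ (k + 1 + 1) by rw [heq, ← pow_succ]]
        exact ih (a + 1) (k + 1) f hd' (by omega) (by omega) (Or.inr (by omega)) (by omega)
      · -- a is not a power of factor: A skips it
        have halt : a < factor ^ (k + 1) := lt_of_le_of_ne hq heq
        have hsm : isSmoothA factor (a.toNat + 1) a = false := by
          rw [← Bool.not_eq_true, isSmoothA_iff factor hf (a.toNat + 1) a ha (by omega)]
          rintro ⟨j, hj1, hj2⟩
          have h1 : (1 : Int) ≤ factor := by omega
          rcases le_or_gt j k with hjk | hjk
          · have : factor ^ j ≤ factor ^ k := pow_le_pow_right₀ h1 hjk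
            rcases hlow with h0 | hlow
            · subst h0
              have hk0 : j = 0 := by omega
              subst hk0; simp at hj1
            · omega
          · have : factor ^ (k + 1) ≤ factor ^ j := pow_le_pow_right₀ h1 (by omega)
            omega
        simp only [List.filter_cons, hsm, Bool.false_eq_true, if_false]
        exact ih (a + 1) k fuel hd' (by omega) (by omega)
          (by rcases hlow with h | h
              exacts [Or.inl h, Or.inr (by omega)]) hfuel
    · rw [PySem.List.pyRange_one_eq_nil (by omega)]
      rw [altLoop_nil limit factor fuel _ (by rintro ⟨h1, h2⟩; omega)]
      rfl

-- ===== VERDICT (by name: the statement is the Claim_ definition above) =====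
theorem func_py_find_smooth_numbers_spec : Claim_equal_func_py_find_smooth_numbers := by
  intro limit factor _ hpre
  unfold Spec_func_py_find_smooth_numbers func_py_find_smooth_numbers func_py_find_smooth_numbers_alt
  by_cases hl : limit ≤ 2
  · rw [PySem.List.pyRange_one_eq_nil hl]
    rw [altLoop_nil limit factor _ factor (by rintro ⟨h1, h2⟩; omega)]
    rfl
  · rcases hpre with hf | h | hneg
    · have := mainG limit factor hf (limit - 2).toNat 2 0 limit.toNat rfl (le_refl 2)
        (by rw [pow_one]; omega) (Or.inl rfl) (by rw [pow_one]; omega)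
      rw [pow_one] at this
      exact this
    · omega
    · -- factor ≤ -limit < -2: no n in range(2, limit) is divisible by factor, so A keeps none
      rw [altLoop_nil limit factor _ factor (by rintro ⟨h1, h2⟩; omega)]
      rw [List.filter_eq_nil_iff]
      intro n hn
      rw [PySem.List.mem_pyRange_one] at hn
      obtain ⟨t, ht⟩ : ∃ t, n.toNat + 1 = t + 1 := ⟨n.toNat, rfl⟩
      rw [ht]
      simp only [isSmoothA, if_pos (by omega : n > 1)]
      have hnd : PySem.Int.mod n factor ≠ 0 := by
        intro hmod
        have hdvd : factor ∣ n := (PySem.Int.mod_eq_zero_iff_dvd n factor).1 hmod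
        have : -factor ≤ n := Int.le_of_dvd (by omega) ((neg_dvd).2 hdvd)
        omega
      simp [hnd]

theorem func_py_find_smooth_numbers_raises : Claim_raises_func_py_find_smooth_numbers := by
  unfold Claim_raises_func_py_find_smooth_numbers
  constructor
  · intro limit factor _ hr
    unfold Raises_func_py_find_smooth_numbers at hr
    unfold Pre_func_py_find_smooth_numbers
    omega
  · refine ⟨by decide, by decide, by decide⟩

-- self-check: the raises theorem's witness component really gives B's value at the raise witness
theorem func_py_find_smooth_numbers_raises_ok :
    func_py_find_smooth_numbers_alt (pvRaiseWitness_func_py_find_smooth_numbers.1)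
      (pvRaiseWitness_func_py_find_smooth_numbers.2) = pvRaiseWitnessOut_func_py_find_smooth_numbers :=
  func_py_find_smooth_numbers_raises.2.2.2
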